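-- pv_equiv track=rewrite | github.com/amiyilade/go-ir | scripts/tree_induction_updated.py | tree_to_intermediate_nodes
-- ===== SOURCE A (Python) =====
-- from typing import Dict, List, Tuple, Set
--
-- def tree_to_intermediate_nodes(parent_indices: List[int]) -> Set[Tuple[int, int]]:
--     """
--     Convert tree to set of intermediate nodes (parent with two children).
--     """
--     n = len(parent_indices)
--     intermediate_nodes = set()
--
--     children_by_parent = {}
--     for i, parent in enumerate(parent_indices):
--         if parent != -1:
--             if parent not in children_by_parent:
--                 children_by_parent[parent] = []
--             children_by_parent[parent].append(i)
--
--     for parent, children in children_by_parent.items():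
--         for i in range(len(children)):
--             for j in range(i + 1, len(children)):
--                 intermediate_nodes.add((children[i], children[j]))
--                 intermediate_nodes.add((children[j], children[i]))
--
--     return intermediate_nodes
-- ===== SOURCE B (Python) =====
-- def tree_to_intermediate_nodes(parent_indices):
--     """
--     Same sibling-pair set, but without the children_by_parent dict:
--     for each first occurrence f of a parent value, rescan the list for
--     all ordered index pairs sharing that parent.
--     """
--     n = len(parent_indices)
--     result = set()
--     for f in range(n):
--         p = parent_indices[f]
--         if p != -1 and p not in parent_indices[:f]:
--             for i in range(n):
--                 if parent_indices[i] == p: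
--                     for j in range(i + 1, n):
--                         if parent_indices[j] == p:
--                             result.add((i, j))
--                             result.add((j, i))
--     return result
-- ===== Notes on version B (the rewrite author's own statement) =====
-- stated objective: alternative
-- what changed: B drops the children_by_parent dict entirely: for each first occurrence of a parent value (detected by a prefix scan) it rescans the whole list over all ordered index pairs sharing that parent, instead of building a parent->children index and pairing within each stored group.
import Mathlib
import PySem

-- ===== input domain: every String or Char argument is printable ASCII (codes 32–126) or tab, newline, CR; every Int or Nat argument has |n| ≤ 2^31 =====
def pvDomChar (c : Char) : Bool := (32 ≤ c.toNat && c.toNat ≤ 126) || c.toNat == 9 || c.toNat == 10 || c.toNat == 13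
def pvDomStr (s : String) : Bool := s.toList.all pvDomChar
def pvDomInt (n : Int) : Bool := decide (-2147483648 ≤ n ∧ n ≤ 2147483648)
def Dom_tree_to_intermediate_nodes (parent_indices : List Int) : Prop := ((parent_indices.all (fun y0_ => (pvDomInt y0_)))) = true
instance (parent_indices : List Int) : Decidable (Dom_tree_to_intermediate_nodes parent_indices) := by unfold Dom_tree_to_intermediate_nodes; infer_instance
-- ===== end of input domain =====

-- B drops A's children_by_parent dict and instead, for each first occurrence of a
-- parent value, rescans the whole list for all ordered index pairs sharing that
-- parent (alternative strategy, same exact result).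


-- ===== PORT A =====
-- Literal port of A.  'if parent not in d: d[parent] = []' followed by
-- 'd[parent].append(i)' is d[parent] = d.get(parent, []) + [i], i.e. Dict.modify.
-- (Python's unused 'n = len(parent_indices)' is dropped.)
def tree_to_intermediate_nodes (parent_indices : List Int) : List (Int × Int) :=
  let children_by_parent : PySem.Dict Int (List Int) :=
    (PySem.List.enumerate parent_indices).foldl
      (fun d ip =>
        if ip.2 ≠ -1 then PySem.Dict.modify d ip.2 [] (fun l => l ++ [ip.1]) else d)
      PySem.Dict.empty
  children_by_parent.items.foldl
    (fun s pc =>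
      (PySem.List.pyRange 0 (pc.2.length : Int) 1).foldl
        (fun s i =>
          (PySem.List.pyRange (i + 1) (pc.2.length : Int) 1).foldl
            (fun s j =>
              PySem.Set.add
                (PySem.Set.add s (PySem.List.pyGetD pc.2 i 0, PySem.List.pyGetD pc.2 j 0))
                (PySem.List.pyGetD pc.2 j 0, PySem.List.pyGetD pc.2 i 0))
            s)
        s)
    PySem.Set.empty

-- ===== PORT B =====
-- Literal port of Source B: triple index scan, first-occurrence test by prefix slice.
def tree_to_intermediate_nodes_alt (parent_indices : List Int) : List (Int × Int) :=
  let n : Int := parent_indices.length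
  (PySem.List.pyRange 0 n 1).foldl
    (fun s f =>
      let p := PySem.List.pyGetD parent_indices f 0
      if p ≠ -1 ∧ p ∉ PySem.List.slice parent_indices none (some f) then
        (PySem.List.pyRange 0 n 1).foldl
          (fun s i =>
            if PySem.List.pyGetD parent_indices i 0 = p then
              (PySem.List.pyRange (i + 1) n 1).foldl
                (fun s j =>
                  if PySem.List.pyGetD parent_indices j 0 = p then
                    PySem.Set.add (PySem.Set.add s (i, j)) (j, i)
                  else s)
                s
            else s)
          s
      else s)
    PySem.Set.empty

-- ===== PRECONDITION & SPEC =====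
def Spec_tree_to_intermediate_nodes (parent_indices : List Int) (out : List (Int × Int)) : Prop := out = tree_to_intermediate_nodes_alt parent_indices
instance (parent_indices : List Int) (out : List (Int × Int)) : Decidable (Spec_tree_to_intermediate_nodes parent_indices out) := by unfold Spec_tree_to_intermediate_nodes; infer_instance

-- ===== CLAIM (what is proved, stated in full; the proofs are below) =====
def Claim_equal_tree_to_intermediate_nodes : Prop := ∀ (parent_indices : List Int), Dom_tree_to_intermediate_nodes parent_indices → Spec_tree_to_intermediate_nodes parent_indices (tree_to_intermediate_nodes parent_indices)

-- ===== LEMMAS AND PROOFS =====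

-- A fold of Set.update steps is Set.update of the concatenated emissions.
theorem pvFoldlUpdate {α β : Type} [BEq β] (g : α → List β) (l : List α) (s : PySem.Set β) :
    l.foldl (fun s x => PySem.Set.update s (g x)) s = PySem.Set.update s (l.flatMap g) := by
  induction l generalizing s with
  | nil => rfl
  | cons a t ih =>
    simp only [List.foldl_cons, List.flatMap_cons, ih]
    simp only [PySem.Set.update, List.foldl_append]

-- flatMap with an if-else-[] body is flatMap over the filter.
theorem pvFlatMapIf {α β : Type} (p : α → Bool) (g : α → List β) (l : List α) :
    (l.flatMap fun x => if p x then g x else []) = (l.filter p).flatMap g := by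
  induction l with
  | nil => rfl
  | cons a t ih => by_cases h : p a <;> simp [h, ih]


def pvKids (ps : List Int) (p : Int) : List Int :=
  (PySem.List.pyRange 0 (ps.length : Int) 1).filter (fun i => PySem.List.pyGetD ps i 0 == p)

def pvParents (ps : List Int) : List Int :=
  PySem.Set.ofList (ps.filter (fun p => decide (p ≠ -1)))

def pvPairs : List Int → List (Int × Int)
  | [] => []
  | k :: rest => (rest.flatMap fun l => [(k, l), (l, k)]) ++ pvPairs rest

theorem pvRangeShift (a b : Int) :
    PySem.List.pyRange (a + 1) (b + 1) 1 = (PySem.List.pyRange a b 1).map (· + 1) := by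
  simp only [PySem.List.pyRange_one, List.map_map]
  have h : b + 1 - (a + 1) = b - a := by ring
  rw [h]
  exact List.map_congr_left (fun k _ => by simp; ring)

theorem pvGetShift (k : Int) (rest : List Int) (x : Int) (hx : 0 ≤ x) :
    PySem.List.pyGetD (k :: rest) (x + 1) 0 = PySem.List.pyGetD rest x 0 := by
  obtain ⟨m, rfl⟩ : ∃ m : Nat, x = (m : Int) := ⟨x.toNat, by omega⟩
  have h : ((m : Int) + 1) = ((m + 1 : Nat) : Int) := by push_cast; ring
  rw [h, PySem.List.pyGetD_natCast, PySem.List.pyGetD_natCast]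
  rfl

theorem pvChain (q : Int → Bool) (n : Int) :
    ∀ (m : Nat) (a : Int), (n - a).toNat = m →
    (((PySem.List.pyRange a n 1).filter q).flatMap fun i =>
      ((PySem.List.pyRange (i + 1) n 1).filter q).flatMap fun j => [(i, j), (j, i)])
    = pvPairs ((PySem.List.pyRange a n 1).filter q) := by
  intro m
  induction m with
  | zero =>
    intro a h
    rw [PySem.List.pyRange_one_eq_nil (by omega)]
    rfl
  | succ m ih =>
    intro a h
    rw [PySem.List.pyRange_one_cons (by omega : a < n)]
    by_cases hq : q a
    · simp only [List.filter_cons, hq, if_true, List.flatMap_cons]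
      rw [pvPairs, ih (a + 1) (by omega)]
    · simp only [List.filter_cons, hq, Bool.false_eq_true, if_false]
      exact ih (a + 1) (by omega)

theorem pvInnerA : ∀ (kids : List Int),
    ((PySem.List.pyRange 0 (kids.length : Int) 1).flatMap fun i =>
      (PySem.List.pyRange (i + 1) (kids.length : Int) 1).flatMap fun j =>
        [(PySem.List.pyGetD kids i 0, PySem.List.pyGetD kids j 0),
         (PySem.List.pyGetD kids j 0, PySem.List.pyGetD kids i 0)]) = pvPairs kids := by
  intro kids
  induction kids with
  | nil => rfl
  | cons k rest ih =>
    have hlen : ((k :: rest).length : Int) = (rest.length : Int) + 1 := by simp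
    rw [PySem.List.pyRange_one_cons (by simp : (0:Int) < ((k :: rest).length : Int)),
        List.flatMap_cons]
    have hhead :
        ((PySem.List.pyRange (0 + 1) ((k :: rest).length : Int) 1).flatMap fun j =>
          [(PySem.List.pyGetD (k :: rest) 0 0, PySem.List.pyGetD (k :: rest) j 0),
           (PySem.List.pyGetD (k :: rest) j 0, PySem.List.pyGetD (k :: rest) 0 0)])
        = rest.flatMap fun l => [(k, l), (l, k)] := by
      have h0 : PySem.List.pyGetD (k :: rest) 0 0 = k := by
        simp [PySem.List.pyGetD]
      rw [h0]
      have hm : (PySem.List.pyRange (0 + 1) ((k :: rest).length : Int) 1).map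
          (fun j => PySem.List.pyGetD (k :: rest) j 0) = rest := by
        have := PySem.List.map_pyGetD_pyRange' (k :: rest) 0 (a := 0 + 1) (by omega)
        simpa using this
      calc (PySem.List.pyRange (0 + 1) ((k :: rest).length : Int) 1).flatMap
              (fun j => [(k, PySem.List.pyGetD (k :: rest) j 0), (PySem.List.pyGetD (k :: rest) j 0, k)])
          = ((PySem.List.pyRange (0 + 1) ((k :: rest).length : Int) 1).map
              (fun j => PySem.List.pyGetD (k :: rest) j 0)).flatMap (fun l => [(k, l), (l, k)]) := by
            rw [List.flatMap_map]
        _ = rest.flatMap fun l => [(k, l), (l, k)] := by rw [hm]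
    have htail :
        ((PySem.List.pyRange (0 + 1) ((k :: rest).length : Int) 1).flatMap fun i =>
          (PySem.List.pyRange (i + 1) ((k :: rest).length : Int) 1).flatMap fun j =>
            [(PySem.List.pyGetD (k :: rest) i 0, PySem.List.pyGetD (k :: rest) j 0),
             (PySem.List.pyGetD (k :: rest) j 0, PySem.List.pyGetD (k :: rest) i 0)])
        = pvPairs rest := by
      have hr : PySem.List.pyRange (0 + 1) ((k :: rest).length : Int) 1
          = (PySem.List.pyRange 0 (rest.length : Int) 1).map (· + 1) := by
        rw [hlen]; rw [show (0:Int) + 1 = 0 + 1 from rfl]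
        exact pvRangeShift 0 (rest.length : Int)
      rw [hr, List.flatMap_map]
      rw [← ih]
      apply List.flatMap_congr
      intro i hi
      have hi0 : 0 ≤ i := by
        rcases PySem.List.mem_pyRange_one.mp hi with ⟨h1, _⟩; omega
      have hr2 : PySem.List.pyRange (i + 1 + 1) ((k :: rest).length : Int) 1
          = (PySem.List.pyRange (i + 1) (rest.length : Int) 1).map (· + 1) := by
        rw [hlen]; exact pvRangeShift (i + 1) (rest.length : Int)
      rw [hr2, List.flatMap_map]
      rw [pvGetShift k rest i hi0]
      apply List.flatMap_congr
      intro j hj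
      have hj0 : 0 ≤ j := by
        rcases PySem.List.mem_pyRange_one.mp hj with ⟨h1, _⟩; omega
      rw [pvGetShift k rest j hj0]
    rw [hhead, htail, pvPairs]


theorem pvGetD_eq_pvKids (ps : List Int) (p : Int) (hp : p ≠ -1) :
    (((PySem.List.enumerate ps).filter (fun ip => decide (ip.2 ≠ -1))).foldl
      (fun d ip => PySem.Dict.modify d ip.2 [] (fun l => l ++ [ip.1]))
      (PySem.Dict.empty : PySem.Dict Int (List Int))).getD p []
    = pvKids ps p := by
  have hswap : (((PySem.List.enumerate ps).filter (fun ip => decide (ip.2 ≠ -1))).foldl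
      (fun d ip => PySem.Dict.modify d ip.2 [] (fun l => l ++ [ip.1]))
      (PySem.Dict.empty : PySem.Dict Int (List Int)))
      = ((((PySem.List.enumerate ps).filter (fun ip => decide (ip.2 ≠ -1))).map Prod.swap).foldl
        (fun d q => PySem.Dict.modify d q.1 [] (fun l => l ++ [q.2]))
        (PySem.Dict.empty : PySem.Dict Int (List Int))) :=
    (List.foldl_map (f := Prod.swap)
      (g := fun (d : PySem.Dict Int (List Int)) (q : Int × Int) =>
        PySem.Dict.modify d q.1 [] (fun l => l ++ [q.2]))
      (l := ((PySem.List.enumerate ps).filter (fun ip => decide (ip.2 ≠ -1))))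
      (init := PySem.Dict.empty)).symm
  rw [hswap, PySem.Dict.getD_foldl_modify_append, PySem.Dict.getD_empty, List.nil_append]
  simp only [List.filter_map, List.map_map, Function.comp_def, Prod.fst_swap, Prod.snd_swap]
  rw [List.filter_filter]
  have h3 : List.filter (fun ip : Int × Int => (ip.2 == p) && decide (ip.2 ≠ -1)) (PySem.List.enumerate ps)
      = List.filter (fun ip : Int × Int => ip.2 == p) (PySem.List.enumerate ps) := by
    apply List.filter_congr
    intro ip _
    by_cases h : ip.2 = p
    · simp [h, hp]
    · simp [h]
  rw [h3, PySem.List.enumerate_eq_map_pyRange ps 0]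
  simp only [List.filter_map, List.map_map, Function.comp_def]
  unfold pvKids
  simp

theorem pvItems (ps : List Int) :
    (((PySem.List.enumerate ps).foldl
      (fun d ip =>
        if ip.2 ≠ -1 then PySem.Dict.modify d ip.2 [] (fun l => l ++ [ip.1]) else d)
      PySem.Dict.empty) : PySem.Dict Int (List Int)).items
    = (pvParents ps).map (fun p => (p, pvKids ps p)) := by
  have hbody : ((PySem.List.enumerate ps).foldl
      (fun d ip =>
        if ip.2 ≠ -1 then PySem.Dict.modify d ip.2 [] (fun l => l ++ [ip.1]) else d)
      (PySem.Dict.empty : PySem.Dict Int (List Int)))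
      = (((PySem.List.enumerate ps).filter (fun ip => decide (ip.2 ≠ -1))).foldl
        (fun d ip => PySem.Dict.modify d ip.2 [] (fun l => l ++ [ip.1]))
        (PySem.Dict.empty : PySem.Dict Int (List Int))) := by
    rw [List.foldl_filter]
    simp only [decide_eq_true_eq]
  rw [hbody]
  have hkeys : (((PySem.List.enumerate ps).filter (fun ip => decide (ip.2 ≠ -1))).foldl
        (fun d ip => PySem.Dict.modify d ip.2 [] (fun l => l ++ [ip.1]))
        (PySem.Dict.empty : PySem.Dict Int (List Int))).keys = pvParents ps := by
    calc (((PySem.List.enumerate ps).filter (fun ip => decide (ip.2 ≠ -1))).foldl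
        (fun d ip => PySem.Dict.modify d ip.2 [] (fun l => l ++ [ip.1]))
        (PySem.Dict.empty : PySem.Dict Int (List Int))).keys
        = PySem.Set.update (PySem.Dict.empty : PySem.Dict Int (List Int)).keys
            (((PySem.List.enumerate ps).filter (fun ip => decide (ip.2 ≠ -1))).map (fun ip => ip.2)) :=
          PySem.Dict.keys_foldl_modify_key
            ((PySem.List.enumerate ps).filter (fun ip => decide (ip.2 ≠ -1)))
            (fun ip : Int × Int => ip.2) ([] : List Int)
            (fun _ ip => (fun l => l ++ [ip.1])) PySem.Dict.empty
      _ = PySem.Set.ofList (((PySem.List.enumerate ps).filter (fun ip => decide (ip.2 ≠ -1))).map (fun ip => ip.2)) :=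
          PySem.Set.update_nil_left _
      _ = PySem.Set.ofList (((PySem.List.enumerate ps).map (fun ip => ip.2)).filter (fun x : Int => decide (x ≠ -1))) := by
          exact congrArg PySem.Set.ofList
            (List.filter_map (l := PySem.List.enumerate ps)
              (f := fun ip : Int × Int => ip.2) (p := fun x : Int => decide (x ≠ -1))).symm
      _ = pvParents ps := by rw [PySem.List.map_snd_enumerate]; rfl
  have hnd : (((PySem.List.enumerate ps).filter (fun ip => decide (ip.2 ≠ -1))).foldl
        (fun d ip => PySem.Dict.modify d ip.2 [] (fun l => l ++ [ip.1]))
        (PySem.Dict.empty : PySem.Dict Int (List Int))).keys.Nodup :=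
    PySem.Dict.nodup_keys_foldl_modify_key
      ((PySem.List.enumerate ps).filter (fun ip => decide (ip.2 ≠ -1)))
      (fun ip : Int × Int => ip.2) ([] : List Int)
      (fun _ ip => (fun l => l ++ [ip.1])) PySem.Dict.empty PySem.Dict.nodup_keys_empty
  rw [PySem.Dict.items_eq_map_keys _ hnd [], hkeys]
  apply List.map_congr_left
  intro p hp
  have hp' : p ≠ -1 := by
    unfold pvParents at hp
    rw [PySem.Set.mem_ofList] at hp
    have := List.of_mem_filter hp
    simpa using this
  rw [pvGetD_eq_pvKids ps p hp']


theorem pvGetAppend (ys : List Int) (x : Int) (f : Int) (h0 : 0 ≤ f) (h1 : f < (ys.length : Int)) :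
    PySem.List.pyGetD (ys ++ [x]) f 0 = PySem.List.pyGetD ys f 0 := by
  obtain ⟨m, rfl⟩ : ∃ m : Nat, f = (m : Int) := ⟨f.toNat, by omega⟩
  rw [PySem.List.pyGetD_natCast, PySem.List.pyGetD_natCast]
  have hm : m < ys.length := by exact_mod_cast h1
  rw [List.getD_eq_getElem?_getD, List.getD_eq_getElem?_getD, List.getElem?_append_left hm]

theorem pvGetLast (ys : List Int) (x : Int) :
    PySem.List.pyGetD (ys ++ [x]) (ys.length : Int) 0 = x := by
  rw [PySem.List.pyGetD_natCast, List.getD_eq_getElem?_getD, List.getElem?_append_right (le_refl _)]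
  simp

theorem pvSliceAppend (ys : List Int) (x : Int) (f : Int) (h0 : 0 ≤ f) (h1 : f ≤ (ys.length : Int)) :
    PySem.List.slice (ys ++ [x]) none (some f) = PySem.List.slice ys none (some f) := by
  obtain ⟨m, rfl⟩ : ∃ m : Nat, f = (m : Int) := ⟨f.toNat, by omega⟩
  rw [PySem.List.slice_to_natCast, PySem.List.slice_to_natCast]
  exact List.take_append_of_le_length (by exact_mod_cast h1)

theorem pvFirstOcc (ps : List Int) :
    (((PySem.List.pyRange 0 (ps.length : Int) 1).filter
        (fun f => decide (PySem.List.pyGetD ps f 0 ≠ -1 ∧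
          PySem.List.pyGetD ps f 0 ∉ PySem.List.slice ps none (some f)))).map
      (fun f => PySem.List.pyGetD ps f 0)) = pvParents ps := by
  induction ps using List.reverseRecOn with
  | nil => rfl
  | append_singleton ys x ih =>
    have hlen : (((ys ++ [x]).length : Int)) = (ys.length : Int) + 1 := by simp
    rw [hlen, PySem.List.pyRange_one_succ_right (by positivity), List.filter_append, List.map_append]
    have hseg1 : ((PySem.List.pyRange 0 (ys.length : Int) 1).filter
        (fun f => decide (PySem.List.pyGetD (ys ++ [x]) f 0 ≠ -1 ∧
          PySem.List.pyGetD (ys ++ [x]) f 0 ∉ PySem.List.slice (ys ++ [x]) none (some f)))).map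
        (fun f => PySem.List.pyGetD (ys ++ [x]) f 0)
        = ((PySem.List.pyRange 0 (ys.length : Int) 1).filter
        (fun f => decide (PySem.List.pyGetD ys f 0 ≠ -1 ∧
          PySem.List.pyGetD ys f 0 ∉ PySem.List.slice ys none (some f)))).map
        (fun f => PySem.List.pyGetD ys f 0) := by
      rw [List.filter_congr (fun f hf => by
        rcases PySem.List.mem_pyRange_one.mp hf with ⟨ha, hb⟩
        rw [pvGetAppend ys x f ha hb, pvSliceAppend ys x f ha (le_of_lt hb)])]
      apply List.map_congr_left
      intro f hf
      have hf' := List.mem_filter.mp hf |>.1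
      rcases PySem.List.mem_pyRange_one.mp hf' with ⟨ha, hb⟩
      exact pvGetAppend ys x f ha hb
    rw [hseg1, ih]
    have hget : PySem.List.pyGetD (ys ++ [x]) (ys.length : Int) 0 = x := pvGetLast ys x
    have hslice : PySem.List.slice (ys ++ [x]) none (some (ys.length : Int)) = ys := by
      rw [PySem.List.slice_to_natCast]
      exact List.take_left
    have hrhs : pvParents (ys ++ [x])
        = if x ≠ -1 ∧ x ∉ ys then pvParents ys ++ [x] else pvParents ys := by
      unfold pvParents
      rw [List.filter_append, PySem.Set.ofList_append]
      by_cases hx : x = -1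
      · simp [hx, PySem.Set.update]
      · have : List.filter (fun p => decide (p ≠ -1)) [x] = [x] := by simp [hx]
        rw [this]
        by_cases hmem : x ∈ ys
        · have hc : (PySem.Set.ofList (ys.filter (fun p => decide (p ≠ -1)))).contains x = true :=
            (PySem.Set.contains_iff _ x).mpr
              ((PySem.Set.mem_ofList _ x).mpr (List.mem_filter.mpr ⟨hmem, by simp [hx]⟩))
          simp [PySem.Set.update, PySem.Set.add, hx, hmem]
        · have hc : (PySem.Set.ofList (ys.filter (fun p => decide (p ≠ -1)))).contains x = false := by
            rw [← Bool.not_eq_true]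
            intro hcon
            exact hmem (List.mem_filter.mp ((PySem.Set.mem_ofList _ x).mp
              ((PySem.Set.contains_iff _ x).mp hcon))).1
          simp [PySem.Set.update, PySem.Set.add, hx, hmem]
    rw [hrhs]
    by_cases hguard : x ≠ -1 ∧ x ∉ ys
    · have : List.filter (fun f => decide (PySem.List.pyGetD (ys ++ [x]) f 0 ≠ -1 ∧
          PySem.List.pyGetD (ys ++ [x]) f 0 ∉ PySem.List.slice (ys ++ [x]) none (some f)))
          [(ys.length : Int)] = [(ys.length : Int)] := by
        simp only [List.filter_cons, List.filter_nil]
        rw [if_pos]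
        simp [hget, hslice, hguard.1, hguard.2]
      rw [this]
      simp [hget, hguard]
    · have : List.filter (fun f => decide (PySem.List.pyGetD (ys ++ [x]) f 0 ≠ -1 ∧
          PySem.List.pyGetD (ys ++ [x]) f 0 ∉ PySem.List.slice (ys ++ [x]) none (some f)))
          [(ys.length : Int)] = [] := by
        simp only [List.filter_cons, List.filter_nil]
        rw [if_neg]
        simp only [hget, hslice, decide_eq_true_eq]
        exact hguard
      rw [this]
      simp [hguard]

theorem pvGroupFold (kids : List Int) (s : PySem.Set (Int × Int)) :
    (PySem.List.pyRange 0 (kids.length : Int) 1).foldl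
      (fun s i =>
        (PySem.List.pyRange (i + 1) (kids.length : Int) 1).foldl
          (fun s j =>
            PySem.Set.add
              (PySem.Set.add s (PySem.List.pyGetD kids i 0, PySem.List.pyGetD kids j 0))
              (PySem.List.pyGetD kids j 0, PySem.List.pyGetD kids i 0))
          s)
      s
    = PySem.Set.update s (pvPairs kids) := by
  have step1 : (PySem.List.pyRange 0 (kids.length : Int) 1).foldl
      (fun s i =>
        (PySem.List.pyRange (i + 1) (kids.length : Int) 1).foldl
          (fun s j =>
            PySem.Set.add
              (PySem.Set.add s (PySem.List.pyGetD kids i 0, PySem.List.pyGetD kids j 0))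
              (PySem.List.pyGetD kids j 0, PySem.List.pyGetD kids i 0))
          s)
      s
      = (PySem.List.pyRange 0 (kids.length : Int) 1).foldl
        (fun s i => PySem.Set.update s
          ((PySem.List.pyRange (i + 1) (kids.length : Int) 1).flatMap fun j =>
            [(PySem.List.pyGetD kids i 0, PySem.List.pyGetD kids j 0),
             (PySem.List.pyGetD kids j 0, PySem.List.pyGetD kids i 0)]))
        s :=
    PySem.List.foldl_congr_mem _ _ _ _ (fun acc i _ =>
      pvFoldlUpdate (fun j =>
        [(PySem.List.pyGetD kids i 0, PySem.List.pyGetD kids j 0),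
         (PySem.List.pyGetD kids j 0, PySem.List.pyGetD kids i 0)]) _ acc)
  exact step1.trans ((pvFoldlUpdate _ _ _).trans (by rw [pvInnerA]))

theorem pvA_eq (ps : List Int) :
    tree_to_intermediate_nodes ps
    = PySem.Set.update PySem.Set.empty
        ((pvParents ps).flatMap fun p => pvPairs (pvKids ps p)) := by
  show (((PySem.List.enumerate ps).foldl
      (fun d ip =>
        if ip.2 ≠ -1 then PySem.Dict.modify d ip.2 [] (fun l => l ++ [ip.1]) else d)
      PySem.Dict.empty) : PySem.Dict Int (List Int)).items.foldl _ PySem.Set.empty = _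
  rw [pvItems, List.foldl_map]
  have stepA : ((pvParents ps).foldl
      (fun s p =>
        (PySem.List.pyRange 0 (((pvKids ps p).length : Int)) 1).foldl
          (fun s i =>
            (PySem.List.pyRange (i + 1) (((pvKids ps p).length : Int)) 1).foldl
              (fun s j =>
                PySem.Set.add
                  (PySem.Set.add s (PySem.List.pyGetD (pvKids ps p) i 0,
                    PySem.List.pyGetD (pvKids ps p) j 0))
                  (PySem.List.pyGetD (pvKids ps p) j 0, PySem.List.pyGetD (pvKids ps p) i 0))
              s)
          s)
      PySem.Set.empty)
      = (pvParents ps).foldl (fun s p => PySem.Set.update s (pvPairs (pvKids ps p)))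
          PySem.Set.empty :=
    PySem.List.foldl_congr_mem _ _ _ _ (fun acc p _ => pvGroupFold (pvKids ps p) acc)
  exact stepA.trans (pvFoldlUpdate (fun p => pvPairs (pvKids ps p)) _ _)

theorem pvB_eq (ps : List Int) :
    tree_to_intermediate_nodes_alt ps
    = PySem.Set.update PySem.Set.empty
        ((pvParents ps).flatMap fun p => pvPairs (pvKids ps p)) := by
  have hjstep : ∀ (p i : Int) (s : PySem.Set (Int × Int)),
      (PySem.List.pyRange (i + 1) ((ps.length : Int)) 1).foldl
        (fun s j =>
          if PySem.List.pyGetD ps j 0 = p then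
            PySem.Set.add (PySem.Set.add s (i, j)) (j, i)
          else s)
        s
      = PySem.Set.update s ((PySem.List.pyRange (i + 1) ((ps.length : Int)) 1).flatMap
          (fun j => if PySem.List.pyGetD ps j 0 == p then [(i, j), (j, i)] else [])) := by
    intro p i s
    have h0 : (PySem.List.pyRange (i + 1) ((ps.length : Int)) 1).foldl
        (fun s j =>
          if PySem.List.pyGetD ps j 0 = p then
            PySem.Set.add (PySem.Set.add s (i, j)) (j, i)
          else s)
        s
        = (PySem.List.pyRange (i + 1) ((ps.length : Int)) 1).foldl
          (fun s j => PySem.Set.update s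
            (if PySem.List.pyGetD ps j 0 == p then [(i, j), (j, i)] else [])) s :=
      PySem.List.foldl_congr_mem _ _ _ _ (fun acc j _ => by
        by_cases h : PySem.List.pyGetD ps j 0 = p
        · rw [if_pos h, if_pos (by simpa using h)]
          rfl
        · rw [if_neg h, if_neg (by simpa using h)]
          rfl)
    exact h0.trans (pvFoldlUpdate _ _ _)
  have hinner : ∀ (p : Int) (s : PySem.Set (Int × Int)),
      (PySem.List.pyRange 0 ((ps.length : Int)) 1).foldl
        (fun s i =>
          if PySem.List.pyGetD ps i 0 = p then
            (PySem.List.pyRange (i + 1) ((ps.length : Int)) 1).foldl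
              (fun s j =>
                if PySem.List.pyGetD ps j 0 = p then
                  PySem.Set.add (PySem.Set.add s (i, j)) (j, i)
                else s)
              s
          else s)
        s
      = PySem.Set.update s (pvPairs (pvKids ps p)) := by
    intro p s
    have h1 : (PySem.List.pyRange 0 ((ps.length : Int)) 1).foldl
        (fun s i =>
          if PySem.List.pyGetD ps i 0 = p then
            (PySem.List.pyRange (i + 1) ((ps.length : Int)) 1).foldl
              (fun s j =>
                if PySem.List.pyGetD ps j 0 = p then
                  PySem.Set.add (PySem.Set.add s (i, j)) (j, i)
                else s)
              s
          else s)
        s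
        = (PySem.List.pyRange 0 ((ps.length : Int)) 1).foldl
          (fun s i => PySem.Set.update s
            (if PySem.List.pyGetD ps i 0 == p then
              (PySem.List.pyRange (i + 1) ((ps.length : Int)) 1).flatMap
                (fun j => if PySem.List.pyGetD ps j 0 == p then [(i, j), (j, i)] else [])
             else [])) s :=
      PySem.List.foldl_congr_mem _ _ _ _ (fun acc i _ => by
        by_cases h : PySem.List.pyGetD ps i 0 = p
        · rw [if_pos h, if_pos (by simpa using h)]
          exact hjstep p i acc
        · rw [if_neg h, if_neg (by simpa using h)]
          rfl)
    have h2 : ((PySem.List.pyRange 0 ((ps.length : Int)) 1).flatMap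
          (fun i => if PySem.List.pyGetD ps i 0 == p then
            (PySem.List.pyRange (i + 1) ((ps.length : Int)) 1).flatMap
              (fun j => if PySem.List.pyGetD ps j 0 == p then [(i, j), (j, i)] else [])
           else []))
        = pvPairs (pvKids ps p) := by
      rw [pvFlatMapIf]
      rw [List.flatMap_congr (fun i _ => pvFlatMapIf
        (fun j => PySem.List.pyGetD ps j 0 == p) (fun j => [(i, j), (j, i)])
        (PySem.List.pyRange (i + 1) ((ps.length : Int)) 1))]
      rw [pvChain (fun i => PySem.List.pyGetD ps i 0 == p) ((ps.length : Int))
        (((ps.length : Int)) - 0).toNat 0 rfl]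
      rfl
    exact h1.trans ((pvFoldlUpdate _ _ _).trans (by rw [h2]))
  show (PySem.List.pyRange 0 ((ps.length : Int)) 1).foldl _ PySem.Set.empty = _
  have hout : (PySem.List.pyRange 0 ((ps.length : Int)) 1).foldl
      (fun s f =>
        let p := PySem.List.pyGetD ps f 0
        if p ≠ -1 ∧ p ∉ PySem.List.slice ps none (some f) then
          (PySem.List.pyRange 0 ((ps.length : Int)) 1).foldl
            (fun s i =>
              if PySem.List.pyGetD ps i 0 = p then
                (PySem.List.pyRange (i + 1) ((ps.length : Int)) 1).foldl
                  (fun s j =>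
                    if PySem.List.pyGetD ps j 0 = p then
                      PySem.Set.add (PySem.Set.add s (i, j)) (j, i)
                    else s)
                  s
              else s)
            s
        else s)
      PySem.Set.empty
      = (PySem.List.pyRange 0 ((ps.length : Int)) 1).foldl
        (fun s f => PySem.Set.update s
          (if decide (PySem.List.pyGetD ps f 0 ≠ -1 ∧
              PySem.List.pyGetD ps f 0 ∉ PySem.List.slice ps none (some f)) then
            pvPairs (pvKids ps (PySem.List.pyGetD ps f 0))
           else [])) PySem.Set.empty :=
    PySem.List.foldl_congr_mem _ _ _ _ (fun acc f _ => by
      show (if PySem.List.pyGetD ps f 0 ≠ -1 ∧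
          PySem.List.pyGetD ps f 0 ∉ PySem.List.slice ps none (some f) then _ else acc) = _
      by_cases h : PySem.List.pyGetD ps f 0 ≠ -1 ∧
          PySem.List.pyGetD ps f 0 ∉ PySem.List.slice ps none (some f)
      · rw [if_pos h, if_pos (by simpa using h)]
        exact hinner _ acc
      · rw [if_neg h, if_neg (by simpa using h)]
        rfl)
  refine hout.trans ((pvFoldlUpdate _ _ _).trans ?_)
  have h3 : ((PySem.List.pyRange 0 ((ps.length : Int)) 1).flatMap
      (fun f => if decide (PySem.List.pyGetD ps f 0 ≠ -1 ∧
          PySem.List.pyGetD ps f 0 ∉ PySem.List.slice ps none (some f)) then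
        pvPairs (pvKids ps (PySem.List.pyGetD ps f 0))
       else []))
      = (pvParents ps).flatMap (fun p => pvPairs (pvKids ps p)) := by
    rw [pvFlatMapIf, ← pvFirstOcc ps, List.flatMap_map]
  rw [h3]

-- ===== VERDICT (by name: the statement is the Claim_ definition above) =====
theorem tree_to_intermediate_nodes_spec : Claim_equal_tree_to_intermediate_nodes := by
  intro ps _
  unfold Spec_tree_to_intermediate_nodes
  rw [pvA_eq, pvB_eq]
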